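-- pv_equiv track=rewrite | github.com/jianbinwei0-blip/agent-chat | agent_chat/config.py | parse_transport_list
-- ===== SOURCE A (Python) =====
-- _SUPPORTED_TRANSPORTS = ("imessage", "telegram", "discord")
--
-- def _normalize_transport_token(token: object) -> str | None:
--     if not isinstance(token, str):
--         return None
--     value = token.strip().lower()
--     if not value:
--         return None
--     if value == "both":
--         return "both"
--     if value in _SUPPORTED_TRANSPORTS:
--         return value
--     return None
--
-- def parse_transport_list(raw_multi: str | None, raw_legacy: str | None = None) -> list[str]:
--     selected: list[str] = []
--     seen: set[str] = set()
--
--     def _add(value: str) -> None: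
--         if value in seen:
--             return
--         seen.add(value)
--         selected.append(value)
--
--     if isinstance(raw_multi, str) and raw_multi.strip():
--         for part in raw_multi.split(","):
--             token = _normalize_transport_token(part)
--             if token is None:
--                 continue
--             if token == "both":
--                 _add("imessage")
--                 _add("telegram")
--             else:
--                 _add(token)
--     else:
--         token = _normalize_transport_token(raw_legacy or "imessage")
--         if token == "both":
--             _add("imessage")
--             _add("telegram")
--         elif token is not None:
--             _add(token)
--
--     if not selected:
--         return ["imessage"]
--     return selected
-- ===== SOURCE B (Python) =====
-- _SUPPORTED_TRANSPORTS = ("imessage", "telegram", "discord")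
--
-- def _normalize_transport_token(token: object) -> str | None:
--     if not isinstance(token, str):
--         return None
--     value = token.strip().lower()
--     if not value:
--         return None
--     if value == "both":
--         return "both"
--     if value in _SUPPORTED_TRANSPORTS:
--         return value
--     return None
--
-- def parse_transport_list(raw_multi, raw_legacy=None):
--     # One uniform token source for both branches.
--     if isinstance(raw_multi, str) and raw_multi.strip():
--         tokens = raw_multi.split(",")
--     else:
--         tokens = [raw_legacy or "imessage"]
--     # Flat expansion stream (duplicates kept; no dedup pass at all).
--     expanded = []
--     for t in tokens:
--         v = _normalize_transport_token(t)
--         if v == "both":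
--             expanded += ["imessage", "telegram"]
--         elif v is not None:
--             expanded += [v]
--     # Loop inversion: instead of scanning the stream and deduplicating,
--     # scan the FIXED candidate set, keep those that occur, and order them
--     # by the position of their first occurrence in the stream.
--     present = [c for c in _SUPPORTED_TRANSPORTS if c in expanded]
--     present.sort(key=expanded.index)
--     return present or ["imessage"]
-- ===== Notes on version B (the rewrite author's own statement) =====
-- stated objective: alternative
-- what changed: Inverts the loop: instead of A's streaming seen-set dedup over tokens (duplicated across two branches), B builds one flat expansion stream from a unified token source, then scans the fixed 3-element candidate set, keeps the candidates that occur, and sorts them by the index of their first occurrence in the stream - no dedup pass at all.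
import Mathlib
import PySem

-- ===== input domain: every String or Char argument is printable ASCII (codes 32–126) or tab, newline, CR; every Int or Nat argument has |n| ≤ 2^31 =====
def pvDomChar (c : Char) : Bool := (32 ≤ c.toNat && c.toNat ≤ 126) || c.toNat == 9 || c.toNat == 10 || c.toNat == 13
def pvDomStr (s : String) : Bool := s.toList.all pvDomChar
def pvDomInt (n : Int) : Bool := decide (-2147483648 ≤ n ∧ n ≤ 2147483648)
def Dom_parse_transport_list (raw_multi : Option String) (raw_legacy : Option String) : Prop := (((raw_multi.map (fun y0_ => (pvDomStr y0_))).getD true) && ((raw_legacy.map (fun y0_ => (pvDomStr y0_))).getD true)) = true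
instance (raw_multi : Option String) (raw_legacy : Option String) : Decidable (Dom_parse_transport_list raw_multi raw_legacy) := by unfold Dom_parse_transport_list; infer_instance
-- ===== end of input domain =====

-- B inverts the loop: instead of streaming tokens through a seen-set dedup, it builds the flat
-- expansion stream, then scans the FIXED candidate set and orders the present candidates by
-- first occurrence (sort by index) — no dedup pass at all (objective: alternative).


-- ===== PORT A =====
-- shared helper: _normalize_transport_token (identical in Source A and Source B; inputs here are strings)
def pvNormalizeTransportToken (token : String) : Option String :=
  let value := PySem.Str.lower (PySem.Str.strip token)
  if value = "" then none
  else if value = "both" then some "both"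
  else if value = "imessage" ∨ value = "telegram" ∨ value = "discord" then some value
  else none

-- raw_legacy or "imessage"  (Python truthiness: None and "" are falsy)
def pvLegacyOrDefault (raw_legacy : Option String) : String :=
  match raw_legacy with
  | some s => if s = "" then "imessage" else s
  | none => "imessage"

-- the closure _add over state (selected, seen)
def pvAdd (st : List String × PySem.Set String) (value : String) : List String × PySem.Set String :=
  if PySem.Set.contains st.2 value then st
  else (st.1 ++ [value], PySem.Set.add st.2 value)

-- body of A's for-loop over raw_multi.split(",")
def pvStepA (st : List String × PySem.Set String) (part : String) : List String × PySem.Set String :=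
  match pvNormalizeTransportToken part with
  | none => st
  | some tok =>
    if tok = "both" then pvAdd (pvAdd st "imessage") "telegram"
    else pvAdd st tok

-- A's else-branch on raw_legacy
def pvLegacyBranch (raw_legacy : Option String) (st : List String × PySem.Set String) :
    List String × PySem.Set String :=
  let token := pvNormalizeTransportToken (pvLegacyOrDefault raw_legacy)
  if token = some "both" then pvAdd (pvAdd st "imessage") "telegram"
  else match token with
       | some t => pvAdd st t
       | none => st

def parse_transport_list (raw_multi : Option String) (raw_legacy : Option String) : List String :=
  let init : List String × PySem.Set String := ([], PySem.Set.empty)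
  let st :=
    match raw_multi with
    | some rm =>
      if PySem.Str.strip rm ≠ "" then ((PySem.Str.split? rm ",").getD []).foldl pvStepA init
      else pvLegacyBranch raw_legacy init
    | none => pvLegacyBranch raw_legacy init
  if st.1 = [] then ["imessage"] else st.1

-- ===== PORT B =====
-- Source B's per-token branch (v = normalize; 'both' → both transports; None → nothing)
def pvExpandB (t : String) : List String :=
  match pvNormalizeTransportToken t with
  | some v => if v = "both" then ["imessage", "telegram"] else [v]
  | none => []

def parse_transport_list_alt (raw_multi : Option String) (raw_legacy : Option String) : List String :=
  let tokens : List String :=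
    match raw_multi with
    | some rm =>
      if PySem.Str.strip rm ≠ "" then (PySem.Str.split? rm ",").getD []
      else [pvLegacyOrDefault raw_legacy]
    | none => [pvLegacyOrDefault raw_legacy]
  -- 'for t in tokens: expanded += …'
  let expanded := tokens.foldl (fun acc t => acc ++ pvExpandB t) []
  -- '[c for c in _SUPPORTED_TRANSPORTS if c in expanded]'
  let present := (["imessage", "telegram", "discord"] : List String).filter
    (fun c => expanded.contains c)
  -- 'present.sort(key=expanded.index)' — every element of present is in expanded, so
  -- list.index never raises; its value there is List.idxOf
  let sortedP := PySem.List.sorted present (fun c => expanded.idxOf c)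
  if sortedP = [] then ["imessage"] else sortedP

-- ===== PRECONDITION & SPEC =====
def Spec_parse_transport_list (raw_multi : Option String) (raw_legacy : Option String) (out : List String) : Prop := out = parse_transport_list_alt raw_multi raw_legacy
instance (raw_multi : Option String) (raw_legacy : Option String) (out : List String) : Decidable (Spec_parse_transport_list raw_multi raw_legacy out) := by unfold Spec_parse_transport_list; infer_instance

-- ===== CLAIM (what is proved, stated in full; the proofs are below) =====
def Claim_equal_parse_transport_list : Prop := ∀ (raw_multi : Option String) (raw_legacy : Option String), Dom_parse_transport_list raw_multi raw_legacy → Spec_parse_transport_list raw_multi raw_legacy (parse_transport_list raw_multi raw_legacy)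

-- ===== LEMMAS AND PROOFS =====

-- ---- A's loop is the seen-set dedup of the flat expansion stream ----

-- _add on a state whose selected list IS its seen set is Set.add on both components
theorem pvAdd_diag (s : PySem.Set String) (v : String) :
    pvAdd (s, s) v = (PySem.Set.add s v, PySem.Set.add s v) := by
  by_cases h : v ∈ s <;> simp [pvAdd, PySem.Set.add, PySem.Set.contains, h]

theorem foldl_pvAdd_diag (l : List String) (s : PySem.Set String) :
    l.foldl pvAdd (s, s) = (l.foldl PySem.Set.add s, l.foldl PySem.Set.add s) := by
  induction l generalizing s with
  | nil => simp
  | cons x xs ih => simp [List.foldl_cons, pvAdd_diag, ih]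

-- A's loop body is a fold of _add over the expansion of the token
theorem pvStepA_eq (st : List String × PySem.Set String) (p : String) :
    pvStepA st p = (pvExpandB p).foldl pvAdd st := by
  unfold pvStepA pvExpandB
  rcases h : pvNormalizeTransportToken p with _ | tok
  · simp
  · by_cases hb : tok = "both" <;> simp [hb, List.foldl]

theorem foldl_pvStepA_eq (parts : List String) (st : List String × PySem.Set String) :
    parts.foldl pvStepA st = (parts.flatMap pvExpandB).foldl pvAdd st := by
  induction parts generalizing st with
  | nil => simp
  | cons p ps ih => rw [List.foldl_cons, List.flatMap_cons, List.foldl_append, pvStepA_eq, ih]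

-- A's else-branch is the fold of _add over the expansion of the single legacy token
theorem pvLegacyBranch_eq (raw_legacy : Option String) (st : List String × PySem.Set String) :
    pvLegacyBranch raw_legacy st = (pvExpandB (pvLegacyOrDefault raw_legacy)).foldl pvAdd st := by
  unfold pvLegacyBranch pvExpandB
  rcases h : pvNormalizeTransportToken (pvLegacyOrDefault raw_legacy) with _ | tok
  · simp
  · by_cases hb : tok = "both" <;> simp [hb, List.foldl]

-- fold of _add from the empty state computes (dedup l, dedup l)
theorem foldl_pvAdd_empty (l : List String) :
    l.foldl pvAdd (([] : List String), PySem.Set.empty) =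
      (PySem.List.dedup l, PySem.List.dedup l) := by
  rw [show (([] : List String), (PySem.Set.empty : PySem.Set String)) =
        ((PySem.Set.empty : PySem.Set String), (PySem.Set.empty : PySem.Set String)) from rfl,
      foldl_pvAdd_diag]
  simp [PySem.List.dedup_eq_ofList, PySem.Set.ofList_eq_foldl, PySem.Set.empty]

-- ---- B's candidate scan + index sort also computes that dedup ----

-- every string the expansion emits is one of the three supported transports
theorem mem_pvExpandB {t x : String}
    (h : x ∈ pvExpandB t) : x ∈ (["imessage", "telegram", "discord"] : List String) := by
  unfold pvExpandB at h
  rcases hn : pvNormalizeTransportToken t with _ | v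
  · rw [hn] at h; simp at h
  · rw [hn] at h
    have hv : v = "both" ∨ v = "imessage" ∨ v = "telegram" ∨ v = "discord" := by
      simp only [pvNormalizeTransportToken] at hn
      split_ifs at hn with h1 h2 h3
      · simp only [Option.some.injEq] at hn; left; exact hn.symm
      · simp only [Option.some.injEq] at hn; right; rw [← hn]; exact h3
    rcases hv with hv | hv | hv | hv <;> subst hv <;> simp at h <;>
      first
        | (rcases h with h | h <;> subst h <;> simp)
        | (subst h; simp)

-- first occurrences of dict-order dedup are strictly increasing positions of the source list
theorem pairwise_idxOf_ofList (e : List String) :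
    (PySem.Set.ofList e).Pairwise (fun x y => e.idxOf x < e.idxOf y) := by
  induction e using List.reverseRecOn with
  | nil => simp [PySem.Set.ofList]
  | append_singleton e a ih =>
    rw [PySem.Set.ofList_append_singleton]
    by_cases hm : a ∈ PySem.Set.ofList e
    · rw [show (PySem.Set.ofList e).add a = PySem.Set.ofList e by
        simp [PySem.Set.add, PySem.Set.contains, hm]]
      refine ih.imp_of_mem ?_
      intro x y hx hy hxy
      rw [PySem.Set.mem_ofList] at hx hy
      rwa [List.idxOf_append_of_mem hx, List.idxOf_append_of_mem hy]
    · rw [show (PySem.Set.ofList e).add a = PySem.Set.ofList e ++ [a] by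
        simp [PySem.Set.add, PySem.Set.contains, hm]]
      rw [List.pairwise_append]
      refine ⟨ih.imp_of_mem ?_, List.pairwise_singleton _ _, ?_⟩
      · intro x y hx hy hxy
        rw [PySem.Set.mem_ofList] at hx hy
        rwa [List.idxOf_append_of_mem hx, List.idxOf_append_of_mem hy]
      · intro x hx y hy
        rw [List.mem_singleton] at hy
        rw [hy]
        rw [PySem.Set.mem_ofList] at hx
        have ha : a ∉ e := fun h => hm ((PySem.Set.mem_ofList e a).mpr h)
        rw [List.idxOf_append_of_mem hx,
            List.idxOf_append, List.idxOf_eq_length_iff.mpr ha]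
        simpa using List.idxOf_lt_length_of_mem hx

-- candidates present in e, sorted by first occurrence, ARE the ordered dedup of e
theorem sorted_present_eq_dedup (e : List String)
    (hsub : ∀ x ∈ e, x ∈ (["imessage", "telegram", "discord"] : List String)) :
    PySem.List.sorted
      ((["imessage", "telegram", "discord"] : List String).filter (fun c => e.contains c))
      (fun c => e.idxOf c) = PySem.List.dedup e := by
  rw [PySem.List.dedup_eq_ofList]
  apply PySem.List.sorted_eq_of_perm_of_pairwise_lt
  · apply (List.perm_ext_iff_of_nodup (PySem.Set.nodup_ofList e) ?_).mpr
    · intro x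
      rw [PySem.Set.mem_ofList]
      simp only [List.mem_filter, List.contains_iff_mem]
      constructor
      · intro hx; exact ⟨hsub x hx, hx⟩
      · intro hx; exact hx.2
    · exact List.Nodup.filter _ (by decide)
  · exact pairwise_idxOf_ofList e

-- ===== VERDICT (by name: the statement is the Claim_ definition above) =====
theorem parse_transport_list_spec : Claim_equal_parse_transport_list := by
  intro raw_multi raw_legacy _
  show parse_transport_list raw_multi raw_legacy = parse_transport_list_alt raw_multi raw_legacy
  have main : ∀ tokens : List String,
      (if (tokens.foldl pvStepA ([], PySem.Set.empty)).1 = [] then ["imessage"]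
       else (tokens.foldl pvStepA ([], PySem.Set.empty)).1) =
      (let expanded := tokens.foldl (fun acc t => acc ++ pvExpandB t) []
       let present := (["imessage", "telegram", "discord"] : List String).filter
         (fun c => expanded.contains c)
       let sortedP := PySem.List.sorted present (fun c => expanded.idxOf c)
       if sortedP = [] then ["imessage"] else sortedP) := by
    intro tokens
    simp only [PySem.List.foldl_append_eq_flatMap, List.nil_append]
    rw [foldl_pvStepA_eq, foldl_pvAdd_empty,
        sorted_present_eq_dedup (tokens.flatMap pvExpandB)
          (fun x hx => mem_pvExpandB (List.mem_flatMap.mp hx).choose_spec.2)]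
  have legacy : pvLegacyBranch raw_legacy ([], PySem.Set.empty)
      = ([pvLegacyOrDefault raw_legacy]).foldl pvStepA ([], PySem.Set.empty) := by
    rw [pvLegacyBranch_eq, List.foldl_cons, List.foldl_nil, pvStepA_eq]
  rcases raw_multi with _ | rm
  · simp only [parse_transport_list, parse_transport_list_alt, legacy]
    exact main _
  · simp only [parse_transport_list, parse_transport_list_alt]
    by_cases h : PySem.Str.strip rm ≠ ""
    · rw [if_pos h, if_pos h]; exact main _
    · rw [if_neg h, if_neg h, legacy]; exact main _
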